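-- pv_equiv track=rewrite | github.com/bigbag/archive_term-flask | helpers/hash_helper.py | get_isin_checksum
-- ===== SOURCE A (Python) =====
-- import string
--
-- def get_isin_checksum(isin):
--     """Calculate and return the check digit"""
--     # Convert alpha characters to digits
--     isin2 = []
--     for char in isin[:-1]:
--         if char.isalpha():
--             isin2.append((string.ascii_uppercase.index(char.upper()) + 9 + 1))
--         else:
--             isin2.append(char)
--     # Convert each int into string and join
--     isin2 = ''.join([str(i) for i in isin2])
--     # Gather every second digit (even)
--     even = isin2[::2]
--     # Gather the other digits (odd)
--     odd = isin2[1::2]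
--     # If len(isin2) is odd, multiply evens by 2, else multiply odds by 2
--     if len(isin2) % 2 > 0:
--         even = ''.join([str(int(i) * 2) for i in list(even)])
--     else:
--         odd = ''.join([str(int(i) * 2) for i in list(odd)])
--     even_sum = sum([int(i) for i in even])
--     # then add each single int in both odd and even
--     odd_sum = sum([int(i) for i in odd])
--     mod = (even_sum + odd_sum) % 10
--
--     result = 10 - mod
--     if result == 10:
--         result = 0
--     return result
-- ===== SOURCE B (Python) =====
-- def get_isin_checksum(isin):
--     """Calculate and return the check digit"""
--     expanded = ''.join(
--         str(ord(c.upper()) - 55) if c.isalpha() else c for c in isin[:-1])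
--     total = 0
--     for i, ch in enumerate(reversed(expanded)):
--         d = int(ch)
--         if i % 2 == 0:
--             d *= 2
--             if d > 9:
--                 d -= 9
--         total += d
--     return (10 - total % 10) % 10
-- ===== Notes on version B (the rewrite author's own statement) =====
-- stated objective: idiomatic
-- what changed: Replaces the even/odd slice split with parity-chosen re-doubling strings by a single right-to-left enumerated pass that doubles every second digit in place (2d-9 when 2d>9) and closes with (10 - total % 10) % 10.
import Mathlib
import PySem

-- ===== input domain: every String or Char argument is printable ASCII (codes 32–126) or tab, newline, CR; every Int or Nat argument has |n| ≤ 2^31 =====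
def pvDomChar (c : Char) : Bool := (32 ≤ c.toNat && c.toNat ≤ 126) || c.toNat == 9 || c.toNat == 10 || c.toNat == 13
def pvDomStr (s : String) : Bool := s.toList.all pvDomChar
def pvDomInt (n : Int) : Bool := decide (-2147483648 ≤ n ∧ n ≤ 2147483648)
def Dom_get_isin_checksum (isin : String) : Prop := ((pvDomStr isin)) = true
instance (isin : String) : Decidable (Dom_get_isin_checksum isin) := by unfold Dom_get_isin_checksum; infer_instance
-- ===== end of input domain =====

-- B replaces A's even/odd slice split (with parity-chosen doubling) by one right-to-left
-- enumerated pass doubling every second digit in place; same results (objective: idiomatic).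

-- ===== PORT A =====
-- int(ch) for a single character; Pre_ keeps every such character a digit (else Python raises ValueError)
def aVal (c : Char) : Int := (PySem.Int.ofChars? [c]).getD 0

-- one loop step of A's first loop fused with the str()+join that follows it
def aPerChar (c : Char) : List Char :=
  if PySem.Chars.isalpha c then
    PySem.Int.toChars
      (((PySem.List.index? "ABCDEFGHIJKLMNOPQRSTUVWXYZ".toList (PySem.Chars.upperChar c)).getD 0 : Int) + 9 + 1)
  else [c]

-- ''.join([str(int(i) * 2) for i in list(cs)])
def aDouble (cs : List Char) : List Char :=
  cs.foldl (fun acc c => acc ++ PySem.Int.toChars (aVal c * 2)) []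

-- sum([int(i) for i in cs])
def aSum (cs : List Char) : Int := (cs.map aVal).sum

def get_isin_checksum (isin : String) : Int :=
  let isin2 := (PySem.List.slice isin.toList none (some (-1))).foldl (fun acc c => acc ++ aPerChar c) []
  let even := (PySem.List.slice? isin2 none none 2).getD []
  let odd := (PySem.List.slice? isin2 (some 1) none 2).getD []
  let even' := if PySem.Int.mod (isin2.length : Int) 2 > 0 then aDouble even else even
  let odd' := if PySem.Int.mod (isin2.length : Int) 2 > 0 then odd else aDouble odd
  let md := PySem.Int.mod (aSum even' + aSum odd') 10
  let result := 10 - md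
  if result = 10 then 0 else result

-- ===== PORT B =====
-- str(ord(c.upper()) - 55) if c.isalpha() else c
def bPerChar (c : Char) : List Char :=
  if PySem.Chars.isalpha c then PySem.Int.toChars (((PySem.Chars.upperChar c).toNat : Int) - 55)
  else [c]

-- body of B's for-loop over enumerate(reversed(expanded))
def bStep (total : Int) (p : Int × Char) : Int :=
  let d := aVal p.2
  if PySem.Int.mod p.1 2 = 0 then total + (if d * 2 > 9 then d * 2 - 9 else d * 2)
  else total + d

def get_isin_checksum_alt (isin : String) : Int :=
  let expanded := ((PySem.List.slice isin.toList none (some (-1))).map bPerChar).flatten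
  let total := (PySem.List.enumerate expanded.reverse 0).foldl bStep 0
  PySem.Int.mod (10 - PySem.Int.mod total 10) 10

-- ===== PRECONDITION & SPEC =====
-- Pre_ excludes exactly the inputs where a non-alphanumeric character occurs in isin[:-1]:
-- there int() raises ValueError in A (and in B alike), so A returns no value.
def Pre_get_isin_checksum (isin : String) : Prop :=
  (isin.toList.dropLast.all (fun c => PySem.Chars.isalpha c || PySem.Chars.isdigit c)) = true
instance (isin : String) : Decidable (Pre_get_isin_checksum isin) := by
  unfold Pre_get_isin_checksum; infer_instance

def pvWitness_get_isin_checksum : String := "US0378331005"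

def Spec_get_isin_checksum (isin : String) (out : Int) : Prop := out = get_isin_checksum_alt isin
instance (isin : String) (out : Int) : Decidable (Spec_get_isin_checksum isin out) := by
  unfold Spec_get_isin_checksum; infer_instance

-- ===== CLAIM (what is proved, stated in full; the proofs are below) =====
def Claim_equal_get_isin_checksum : Prop := ∀ (isin : String), Dom_get_isin_checksum isin → Pre_get_isin_checksum isin → Spec_get_isin_checksum isin (get_isin_checksum isin)

-- ===== LEMMAS AND PROOFS =====

-- every other element, starting with the first (what Python's cs[::2] collects)
def eo {α : Type} : List α → List α
  | [] => []
  | [x] => [x]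
  | x :: _ :: t => x :: eo t

def isDig (c : Char) : Bool := 48 ≤ c.toNat && c.toNat ≤ 57

def dblI (d : Int) : Int := if d * 2 > 9 then d * 2 - 9 else d * 2

-- A's even/odd-split-and-double total, after the slices are named eo l / eo l.tail
def aCore (l : List Char) : Int :=
  if PySem.Int.mod (l.length : Int) 2 > 0 then aSum (aDouble (eo l)) + aSum (eo l.tail)
  else aSum (eo l) + aSum (aDouble (eo l.tail))

-- B's per-position contribution, summed over enumerate(reversed l)
def bS (l : List Char) : Int :=
  ((PySem.List.enumerate l.reverse 0).map
    (fun p => if PySem.Int.mod p.1 2 = 0 then dblI (aVal p.2) else aVal p.2)).sum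

lemma eo_cons {α : Type} (a : α) (b : List α) : eo (a :: b) = a :: eo b.tail := by
  match b with
  | [] => rfl
  | c :: t => rfl

lemma mem_eo {α : Type} {c : α} : ∀ {l : List α}, c ∈ eo l → c ∈ l
  | [], h => by simp [eo] at h
  | [x], h => by simpa [eo] using h
  | x :: y :: t, h => by
      rcases (by simpa [eo] using h : c = x ∨ c ∈ eo t) with h | h
      · simp [h]
      · simp [mem_eo h]

lemma eo_get : ∀ (l : List Char),
    (List.range ((l.length + 1) / 2)).filterMap (fun k => l[2 * k]?) = eo l
  | [] => by simp [eo]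
  | [x] => by simp [eo, List.range_succ]
  | x :: y :: t => by
      have ih := eo_get t
      have hdiv : ((x :: y :: t).length + 1) / 2 = (t.length + 1) / 2 + 1 := by
        simp; omega
      rw [hdiv, List.range_succ_eq_map, List.filterMap_cons, List.filterMap_map]
      simp only [Nat.mul_zero, List.getElem?_cons_zero]
      rw [eo_cons]
      refine congrArg (List.cons x) ?_
      rw [show (y :: t).tail = t from rfl, ← ih]
      apply List.filterMap_congr
      intro k _
      have h2 : 2 * Nat.succ k = 2 * k + 1 + 1 := by omega
      simp only [Function.comp_apply, h2, List.getElem?_cons_succ]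

lemma slice2_eq (l : List Char) : (PySem.List.slice? l none none 2).getD [] = eo l := by
  rw [← eo_get l]
  simp only [PySem.List.slice?, PySem.List.sliceIndices]
  norm_num
  rcases Nat.eq_zero_or_pos l.length with h0 | hpos
  · have : l = [] := List.length_eq_zero_iff.mp h0
    simp [this]
  · rw [if_pos hpos]
    have hcount : (((l.length : Int) + 2 - 1) / 2).toNat = (l.length + 1) / 2 := by omega
    rw [hcount]
    apply List.filterMap_congr
    intro k _
    have : ((2 * (k : Int))).toNat = 2 * k := by omega
    simp [this]

lemma slice12_eq (l : List Char) :
    (PySem.List.slice? l (some 1) none 2).getD [] = eo l.tail := by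
  match l with
  | [] => rfl
  | x :: t =>
    rw [show (x :: t).tail = t from rfl, ← eo_get t]
    simp only [PySem.List.slice?, PySem.List.sliceIndices]
    norm_num
    rcases Nat.eq_zero_or_pos t.length with h0 | hpos
    · have : t = [] := List.length_eq_zero_iff.mp h0
      simp [this]
    · rw [if_pos hpos]
      have hcount : (((t.length : Int) + 2 - 1) / 2).toNat = (t.length + 1) / 2 := by omega
      rw [hcount]
      apply List.filterMap_congr
      intro k _
      have h1 : ((1 : Int) + 2 * (k : Int)).toNat = 2 * k + 1 := by omega
      rw [h1, List.getElem?_cons_succ]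

lemma aSum_append (a b : List Char) : aSum (a ++ b) = aSum a + aSum b := by
  simp [aSum]

lemma aDouble_eq_flatMap (cs : List Char) :
    aDouble cs = cs.flatMap (fun c => PySem.Int.toChars (aVal c * 2)) := by
  unfold aDouble
  rw [PySem.List.foldl_append_eq_flatMap]
  simp

set_option maxRecDepth 4096 in
lemma key_dbl : ((List.range 127).all (fun n => !(isDig (Char.ofNat n)) ||
    (aSum (PySem.Int.toChars (aVal (Char.ofNat n) * 2)) == dblI (aVal (Char.ofNat n))))) = true := by rfl

lemma dbl_char (c : Char) (h : isDig c = true) :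
    aSum (PySem.Int.toChars (aVal c * 2)) = dblI (aVal c) := by
  have hle : c.toNat < 127 := by
    unfold isDig at h; simp at h; omega
  have := List.all_eq_true.mp key_dbl c.toNat (List.mem_range.mpr hle)
  rw [Char.ofNat_toNat] at this
  simp only [h, Bool.not_true, Bool.false_or, beq_iff_eq] at this
  exact this

lemma aSum_aDouble (cs : List Char) (h : ∀ c ∈ cs, isDig c = true) :
    aSum (aDouble cs) = (cs.map (fun c => dblI (aVal c))).sum := by
  induction cs with
  | nil => rfl
  | cons c t ih =>
    rw [aDouble_eq_flatMap] at *
    rw [List.flatMap_cons, aSum_append, dbl_char c (h c (by simp))]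
    simp only [List.map_cons, List.sum_cons]
    rw [ih (fun d hd => h d (by simp [hd]))]

lemma bS_core : ∀ (l : List Char), (∀ c ∈ l, isDig c = true) → aCore l = bS l
  | [], _ => by simp [aCore, aSum, aDouble, eo, bS, PySem.Int.mod]
  | [x], h => by
      have hx := h x (by simp)
      have hb : bS [x] = dblI (aVal x) := by
        simp [bS, PySem.List.enumerate]
      rw [hb]
      unfold aCore
      have hm1 : PySem.Int.mod ((([x] : List Char).length : Nat) : Int) 2 = ((1 % 2 : Nat) : Int) :=
        PySem.Int.mod_natCast 1 2
      rw [hm1]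
      have hd : aDouble [x] = PySem.Int.toChars (aVal x * 2) := by simp [aDouble]
      norm_num [eo, hd, dbl_char x hx]
      simp [aSum]
  | x :: y :: t, h => by
      have ih := bS_core t (fun c hc => h c (by simp [hc]))
      have hx := h x (by simp)
      have hy := h y (by simp)
      have hdigeo : ∀ c ∈ eo t, isDig c = true := fun c hc => h c (by simp [mem_eo hc])
      have hdigeot : ∀ c ∈ eo t.tail, isDig c = true := fun c hc =>
        h c (by simp [List.mem_of_mem_tail (mem_eo hc)])
      -- B side
      have hrev : (x :: y :: t).reverse = t.reverse ++ [y, x] := by simp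
      have hbs : bS (x :: y :: t) = bS t
          + (if PySem.Int.mod ((t.length : Nat) : Int) 2 = 0 then dblI (aVal y) else aVal y)
          + (if PySem.Int.mod ((t.length : Nat) : Int) 2 = 0 then aVal x else dblI (aVal x)) := by
        unfold bS
        rw [hrev, PySem.List.enumerate_append]
        simp only [List.map_append, List.sum_append, List.length_reverse]
        have h2 : PySem.List.enumerate [y, x] (0 + (t.length : Int)) =
            [((t.length : Int), y), ((t.length : Int) + 1, x)] := by
          simp [PySem.List.enumerate]
        rw [h2]
        simp only [List.map_cons, List.map_nil, List.sum_cons, List.sum_nil]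
        rw [show PySem.Int.mod ((t.length : Int)) 2 = ((t.length % 2 : Nat) : Int) from
          PySem.Int.mod_natCast t.length 2]
        rw [show ((t.length : Int) + 1) = (((t.length + 1 : Nat)) : Int) from by push_cast; ring]
        rw [show PySem.Int.mod (((t.length + 1 : Nat)) : Int) 2 = (((t.length + 1) % 2 : Nat) : Int) from
          PySem.Int.mod_natCast (t.length + 1) 2]
        rcases Nat.even_or_odd t.length with he | ho
        · have h1 : t.length % 2 = 0 := Nat.even_iff.mp he
          have h2' : (t.length + 1) % 2 = 1 := by omega
          simp [h1, h2']; ring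
        · have h1 : t.length % 2 = 1 := Nat.odd_iff.mp ho
          have h2' : (t.length + 1) % 2 = 0 := by omega
          simp [h1, h2']; ring
      -- A side
      have heo1 : eo (x :: y :: t) = x :: eo t := rfl
      have heo2 : eo (x :: y :: t).tail = y :: eo t.tail := by
        rw [show (x :: y :: t).tail = y :: t from rfl, eo_cons]
      have hmod : PySem.Int.mod (((x :: y :: t).length : Nat) : Int) 2 = ((t.length % 2 : Nat) : Int) := by
        have h2' : PySem.Int.mod (((t.length + 2 : Nat)) : Int) 2 = (((t.length + 2) % 2 : Nat) : Int) :=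
          PySem.Int.mod_natCast (t.length + 2) 2
        rw [show (((x :: y :: t).length : Nat) : Int) = (((t.length + 2 : Nat)) : Int) from by simp; ring, h2']
        congr 1; omega
      have hmodt : PySem.Int.mod ((t.length : Nat) : Int) 2 = ((t.length % 2 : Nat) : Int) :=
        PySem.Int.mod_natCast t.length 2
      unfold aCore
      rw [hmod, heo1, heo2]
      unfold aCore at ih
      rw [hmodt] at ih hbs
      have hdx : aSum (aDouble (x :: eo t)) = dblI (aVal x) + aSum (aDouble (eo t)) := by
        rw [aSum_aDouble _ (by intro c hc; rcases List.mem_cons.mp hc with rfl | hc; exact hx; exact hdigeo c hc),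
            aSum_aDouble _ hdigeo]
        simp
      have hdy : aSum (aDouble (y :: eo t.tail)) = dblI (aVal y) + aSum (aDouble (eo t.tail)) := by
        rw [aSum_aDouble _ (by intro c hc; rcases List.mem_cons.mp hc with rfl | hc; exact hy; exact hdigeot c hc),
            aSum_aDouble _ hdigeot]
        simp
      rcases Nat.even_or_odd t.length with he | ho
      · have h1 : t.length % 2 = 0 := Nat.even_iff.mp he
        rw [h1] at ih hbs ⊢
        norm_num at ih hbs ⊢
        rw [hbs, ← ih, hdy]
        simp only [aSum, List.map_cons, List.sum_cons]
        ring
      · have h1 : t.length % 2 = 1 := Nat.odd_iff.mp ho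
        rw [h1] at ih hbs ⊢
        norm_num at ih hbs ⊢
        rw [hbs, ← ih, hdx]
        simp only [aSum, List.map_cons, List.sum_cons]
        ring

lemma bStep_eq : bStep = fun total p =>
    total + (if PySem.Int.mod p.1 2 = 0 then dblI (aVal p.2) else aVal p.2) := by
  funext total p
  simp only [bStep, dblI]
  split_ifs <;> ring

lemma bfold (l : List Char) : (PySem.List.enumerate l.reverse 0).foldl bStep 0 = bS l := by
  rw [bStep_eq, PySem.List.foldl_add]
  simp [bS]

set_option maxRecDepth 4096 in
lemma key_per : ((List.range 127).all (fun n => aPerChar (Char.ofNat n) == bPerChar (Char.ofNat n))) = true := by rfl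

lemma perChar_eq (c : Char) (h : pvDomChar c = true) : aPerChar c = bPerChar c := by
  have hle : c.toNat < 127 := by
    unfold pvDomChar at h; simp at h; omega
  have := List.all_eq_true.mp key_per c.toNat (List.mem_range.mpr hle)
  rw [Char.ofNat_toNat] at this
  exact beq_iff_eq.mp this

set_option maxRecDepth 4096 in
lemma key_dig : ((List.range 127).all (fun n =>
    !(PySem.Chars.isalpha (Char.ofNat n) || PySem.Chars.isdigit (Char.ofNat n)) ||
    ((aPerChar (Char.ofNat n)).all isDig))) = true := by rfl

lemma perChar_digits (c : Char) (h : pvDomChar c = true)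
    (ha : (PySem.Chars.isalpha c || PySem.Chars.isdigit c) = true) :
    ∀ d ∈ aPerChar c, isDig d = true := by
  have hle : c.toNat < 127 := by
    unfold pvDomChar at h; simp at h; omega
  have := List.all_eq_true.mp key_dig c.toNat (List.mem_range.mpr hle)
  rw [Char.ofNat_toNat, ha] at this
  simp only [Bool.not_true, Bool.false_or] at this
  exact List.all_eq_true.mp this

lemma final_eq (S : Int) :
    (if 10 - PySem.Int.mod S 10 = 10 then (0 : Int) else 10 - PySem.Int.mod S 10) =
    PySem.Int.mod (10 - PySem.Int.mod S 10) 10 := by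
  rw [show PySem.Int.mod S 10 = S % 10 from PySem.Int.mod_eq_emod_of_pos (by norm_num)]
  rw [show PySem.Int.mod (10 - S % 10) 10 = (10 - S % 10) % 10 from PySem.Int.mod_eq_emod_of_pos (by norm_num)]
  have h0 : 0 ≤ S % 10 := Int.emod_nonneg S (by norm_num)
  have h1 : S % 10 < 10 := Int.emod_lt_of_pos S (by norm_num)
  split_ifs with h <;> omega

-- ===== VERDICT (by name: the statement is the Claim_ definition above) =====
theorem get_isin_checksum_spec : Claim_equal_get_isin_checksum := by
  intro isin hdom hpre
  unfold Spec_get_isin_checksum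
  simp only [get_isin_checksum, get_isin_checksum_alt]
  rw [PySem.List.slice_to_neg_one]
  set cs := isin.toList.dropLast with hcs
  have hdomc : ∀ c ∈ cs, pvDomChar c = true := by
    intro c hc
    have : c ∈ isin.toList := List.dropLast_subset _ hc
    unfold Dom_get_isin_checksum pvDomStr at hdom
    exact List.all_eq_true.mp hdom c this
  have hprec : ∀ c ∈ cs, (PySem.Chars.isalpha c || PySem.Chars.isdigit c) = true := by
    intro c hc
    unfold Pre_get_isin_checksum at hpre
    exact List.all_eq_true.mp hpre c hc
  -- the two expansions agree
  have hexp : cs.foldl (fun acc c => acc ++ aPerChar c) [] = (cs.map bPerChar).flatten := by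
    rw [PySem.List.foldl_append_eq_flatMap, List.nil_append, List.flatMap_def]
    congr 1
    exact List.map_congr_left (fun c hc => perChar_eq c (hdomc c hc))
  rw [← hexp]
  set l := cs.foldl (fun acc c => acc ++ aPerChar c) [] with hl
  have hdig : ∀ c ∈ l, isDig c = true := by
    intro c hc
    rw [hl, PySem.List.foldl_append_eq_flatMap, List.nil_append] at hc
    rcases List.mem_flatMap.mp hc with ⟨a, ha, hca⟩
    exact perChar_digits a (hdomc a ha) (hprec a ha) c hca
  rw [slice2_eq, slice12_eq, bfold, ← bS_core l hdig]
  have hsum : (if PySem.Int.mod ((l.length : Nat) : Int) 2 > 0 then aSum (aDouble (eo l)) else aSum (eo l))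
      + (if PySem.Int.mod ((l.length : Nat) : Int) 2 > 0 then aSum (eo l.tail) else aSum (aDouble (eo l.tail)))
      = aCore l := by
    unfold aCore
    split_ifs <;> rfl
  simp only [apply_ite aSum]
  rw [hsum]
  exact final_eq (aCore l)
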